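-- pv_equiv track=rewrite | github.com/HyunJinNo/Algorithm | 프로그래머스/3/12938. 최고의 집합/최고의 집합.py | solution
-- ===== SOURCE A (Python) =====
-- def solution(n, s):
--     if n > s:
--         return [-1]
--     else:
--         answer = [s // n] * n
--         for i in range(s - sum(answer)):
--             answer[-(i + 1)] += 1
--         return answer
-- ===== SOURCE B (Python) =====
-- def solution(n, s):
--     if n > s:
--         return [-1]
--     out = []
--     while n > 0:
--         v = -(-s // n)  # largest element = ceiling of remaining average
--         out.append(v)
--         s -= v
--         n -= 1
--     out.reverse()
--     return out
-- ===== Notes on version B (the rewrite author's own statement) =====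
-- stated objective: alternative
-- what changed: B is a greedy one-pass loop: it repeatedly extracts the ceiling of the remaining average -(-s//n) as the next (largest) element, updating the remaining sum and count, then reverses; A instead pre-fills [s//n]*n and mutates the last s%n entries by negative-index increments.
import Mathlib
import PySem

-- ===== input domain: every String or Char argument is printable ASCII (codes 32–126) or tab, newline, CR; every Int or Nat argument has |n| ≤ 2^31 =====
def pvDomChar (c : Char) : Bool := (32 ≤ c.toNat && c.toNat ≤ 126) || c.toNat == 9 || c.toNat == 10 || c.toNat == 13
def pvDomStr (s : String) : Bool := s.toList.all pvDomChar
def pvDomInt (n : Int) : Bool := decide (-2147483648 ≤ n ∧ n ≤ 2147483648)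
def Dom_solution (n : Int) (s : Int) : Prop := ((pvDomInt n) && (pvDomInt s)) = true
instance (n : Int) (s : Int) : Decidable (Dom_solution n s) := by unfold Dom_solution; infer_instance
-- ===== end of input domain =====

-- B builds the answer greedily back-to-front: each step takes the ceiling of the remaining
-- average -(-s//n) as the next (largest) element, then reverses; objective: alternative.

-- ===== PORT A =====
def solution (n : Int) (s : Int) : List Int :=
  if n > s then [-1]
  else
    let answer := List.replicate n.toNat (PySem.Int.floordiv s n)
    (PySem.List.pyRange 0 (s - answer.sum) 1).foldl
      (fun acc i =>
        PySem.List.pySetD acc (-(i + 1)) (PySem.List.pyGetD acc (-(i + 1)) 0 + 1))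
      answer

-- ===== PORT B =====
-- B's while loop (condition n > 0, n decreases by 1 each pass): fuel n.toNat is exact.
def solutionAltGo (fuel : Nat) (n : Int) (s : Int) (out : List Int) : List Int :=
  match fuel with
  | 0 => out
  | k + 1 =>
    if n > 0 then
      let v := -(PySem.Int.floordiv (-s) n)
      solutionAltGo k (n - 1) (s - v) (out ++ [v])
    else out

def solution_alt (n : Int) (s : Int) : List Int :=
  if n > s then [-1]
  else (solutionAltGo n.toNat n s []).reverse

-- ===== PRECONDITION & SPEC =====
-- Pre_ excludes exactly the inputs where A raises: n = 0 ∧ s ≥ 0 (ZeroDivisionError in s // n)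
-- and n < 0 ∧ s > 0 (IndexError: the list is empty but the increment loop runs).
def Pre_solution (n : Int) (s : Int) : Prop :=
  ¬ ((n = 0 ∧ 0 ≤ s) ∨ (n < 0 ∧ 0 < s))
instance (n : Int) (s : Int) : Decidable (Pre_solution n s) := by unfold Pre_solution; infer_instance

def pvWitness_solution : Int × Int := (3, 11)

def Spec_solution (n : Int) (s : Int) (out : List Int) : Prop := out = solution_alt n s
instance (n : Int) (s : Int) (out : List Int) : Decidable (Spec_solution n s out) := by unfold Spec_solution; infer_instance

-- ===== CLAIM (what is proved, stated in full; the proofs are below) =====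
def Claim_equal_solution : Prop := ∀ (n : Int) (s : Int), Dom_solution n s → Pre_solution n s → Spec_solution n s (solution n s)

-- ===== LEMMAS AND PROOFS =====

-- setting the last element of a replicate-block
lemma set_replicate_last {α : Type} (m : Nat) (q v : α) :
    (List.replicate (m + 1) q).set m v = List.replicate m q ++ [v] := by
  induction m with
  | zero => rfl
  | succ m ih => simpa [List.replicate_succ] using ih

-- the body of A's loop at step k (k < N elements already incremented, index -(k+1))
lemma step_on_blocks (N k : Nat) (q : Int) (h : k < N) :
    (PySem.List.pySetD (List.replicate (N - k) q ++ List.replicate k (q + 1)) (-((k : Int) + 1))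
      (PySem.List.pyGetD (List.replicate (N - k) q ++ List.replicate k (q + 1)) (-((k : Int) + 1)) 0 + 1))
    = List.replicate (N - (k + 1)) q ++ List.replicate (k + 1) (q + 1) := by
  have hlen : (List.replicate (N - k) q ++ List.replicate k (q + 1)).length = N := by
    simp; omega
  have hget : PySem.List.pyGetD (List.replicate (N - k) q ++ List.replicate k (q + 1)) (-((k : Int) + 1)) 0 = q := by
    simp only [PySem.List.pyGetD, PySem.List.pyGet?, PySem.List.pyIdx?, hlen]
    split_ifs with h1 h2 <;> try omega
    · simp only [neg_neg]
      have hk1 : ((k : Int) + 1).toNat = k + 1 := by omega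
      rw [hk1]
      have hlt : N - (k + 1) < N - k := by omega
      simp only [Option.bind_some]
      rw [List.getElem?_append_left (by simp; omega)]
      simp [hlt]
  rw [hget]
  simp only [PySem.List.pySetD, PySem.List.pySet?, PySem.List.pyIdx?, hlen]
  split_ifs with h1 h2 <;> try omega
  · simp only [neg_neg]
    have hk1 : ((k : Int) + 1).toNat = k + 1 := by omega
    rw [hk1]
    simp only [Option.map_some, Option.getD_some]
    rw [List.set_append_left _ _ (by simp; omega)]
    have : N - k = (N - (k + 1)) + 1 := by omega
    rw [this, set_replicate_last]
    simp only [List.append_assoc, List.singleton_append, List.append_cancel_left_eq]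
    rw [← List.replicate_succ, List.replicate_succ']

-- A's loop, run for k steps on [q]*N, leaves [q]*(N-k) ++ [q+1]*k
lemma loop_blocks (N : Nat) (q : Int) (k : Nat) (h : k ≤ N) :
    (PySem.List.pyRange 0 (k : Int) 1).foldl
      (fun acc i => PySem.List.pySetD acc (-(i + 1)) (PySem.List.pyGetD acc (-(i + 1)) 0 + 1))
      (List.replicate N q)
    = List.replicate (N - k) q ++ List.replicate k (q + 1) := by
  induction k with
  | zero => simp
  | succ k ih =>
    have hk : (k : Int) + 1 = ((k + 1 : Nat) : Int) := by push_cast; ring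
    rw [← hk, PySem.List.pyRange_one_succ_right (by positivity), List.foldl_append,
        ih (by omega)]
    simpa using step_on_blocks N k q (by omega)

-- the ceiling step of B: with remaining sum q*k + r (0 ≤ r < k), the extracted element
lemma ceil_step_zero (k q : Int) (hk : 0 < k) :
    -(PySem.Int.floordiv (-(q * k + 0)) k) = q := by
  rw [PySem.Int.neg_floordiv_neg_eq_iff_of_pos hk]
  constructor <;> nlinarith

lemma ceil_step_pos (k q r : Int) (hk : 0 < k) (h0 : 0 < r) (h1 : r < k) :
    -(PySem.Int.floordiv (-(q * k + r)) k) = q + 1 := by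
  rw [PySem.Int.neg_floordiv_neg_eq_iff_of_pos hk]
  constructor <;> nlinarith

-- B's loop on a remaining sum q*k + r (0 ≤ r < k) appends r copies of q+1 then k-r copies of q
lemma loopB_blocks (k : Nat) (q r : Int) (acc : List Int) (h0 : 0 ≤ r) (h1 : r < k) :
    solutionAltGo k (k : Int) (q * k + r) acc
      = acc ++ List.replicate r.toNat (q + 1) ++ List.replicate (k - r.toNat) q := by
  induction k generalizing q r acc with
  | zero => omega
  | succ k ih =>
    have hkpos : (0 : Int) < ((k : Int) + 1) := by positivity
    simp only [solutionAltGo]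
    push_cast
    rw [if_pos hkpos]
    rcases eq_or_ne r 0 with h | h
    · subst h
      rw [ceil_step_zero ((k : Int) + 1) q hkpos]
      rcases Nat.eq_zero_or_pos k with hk0 | hkpos'
      · subst hk0
        simp [solutionAltGo]
      · have hstep : q * ((k : Int) + 1) + 0 - q = q * (k : Int) + 0 := by ring
        have harg : ((k : Int) + 1) - 1 = (k : Int) := by ring
        rw [harg, hstep, ih q 0 (acc ++ [q]) le_rfl (by exact_mod_cast hkpos')]
        simp [List.replicate_succ, List.append_assoc]
    · rw [ceil_step_pos ((k : Int) + 1) q r hkpos (by omega) (by exact_mod_cast h1)]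
      have hstep : q * ((k : Int) + 1) + r - (q + 1) = q * (k : Int) + (r - 1) := by ring
      have harg : ((k : Int) + 1) - 1 = (k : Int) := by ring
      rw [harg, hstep, ih q (r - 1) (acc ++ [q + 1]) (by omega) (by omega)]
      have hr : r.toNat = (r - 1).toNat + 1 := by omega
      have hr2 : k - (r - 1).toNat = k + 1 - r.toNat := by omega
      rw [hr2, hr, List.replicate_succ]
      simp [List.append_assoc]

-- ===== VERDICT (by name: the statement is the Claim_ definition above) =====
theorem solution_spec : Claim_equal_solution := by
  intro n s _ hpre
  unfold Spec_solution solution solution_alt Pre_solution at *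
  by_cases hns : n > s
  · simp [hns]
  · simp only [hns, if_false]
    push Not at hns
    rcases lt_trichotomy n 0 with hn | hn | hn
    · -- n < 0, hence s ≤ 0: both sides are []
      have hs : s ≤ 0 := by
        by_contra h; exact hpre (Or.inr ⟨hn, by omega⟩)
      have hmod := PySem.Int.mod_neg_bounds s (b := n) hn
      have h1 : n.toNat = 0 := by omega
      simp only [h1, List.replicate_zero, List.sum_nil, sub_zero]
      rw [PySem.List.pyRange_one_eq_nil (by omega : s ≤ (0:Int))]
      rfl
    · exact absurd (Or.inl ⟨hn, by omega⟩) hpre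
    · -- n > 0: the standard case
      set q := PySem.Int.floordiv s n with hq
      set r := PySem.Int.mod s n with hr
      have hrnn : 0 ≤ r := PySem.Int.mod_nonneg s hn
      have hrlt : r < n := PySem.Int.mod_lt s hn
      have hdm : q * n + r = s := PySem.Int.floordiv_mul_add_mod s n
      have hsum : (List.replicate n.toNat q).sum = (n.toNat : Int) * q := by
        simp [List.sum_replicate]
      have hnn : ((n.toNat : Int)) = n := Int.toNat_of_nonneg (by omega)
      have hrange : s - (List.replicate n.toNat q).sum = ((r.toNat : Nat) : Int) := by
        rw [hsum, hnn, Int.toNat_of_nonneg hrnn, mul_comm]; linarith [hdm]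
      rw [hrange, loop_blocks n.toNat q r.toNat (by omega)]
      have hB : solutionAltGo n.toNat n s []
          = [] ++ List.replicate r.toNat (q + 1) ++ List.replicate (n.toNat - r.toNat) q := by
        have h1 : ((n.toNat : Nat) : Int) = n := hnn
        have h2 : q * ((n.toNat : Nat) : Int) + r = s := by rw [h1]; exact hdm
        rw [← h1, ← h2]
        exact loopB_blocks n.toNat q r [] hrnn (by omega)
      rw [hB]
      simp only [List.nil_append, List.reverse_append, List.reverse_replicate]
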